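-- pv_equiv track=rewrite | github.com/UrsaruBoss/youtube-narrative | scripts/50_tactics_analysis.py | bucketize_lengths
-- ===== SOURCE A (Python) =====
-- BUCKET_SIZES = [32, 64, 96, 128, 160, 192, 256]
--
-- def bucketize_lengths(lengths):
--     """
--     Assign each length to the smallest bucket >= length.
--     """
--     out = []
--     for L in lengths:
--         b = None
--         for s in BUCKET_SIZES:
--             if L <= s:
--                 b = s
--                 break
--         out.append(b or BUCKET_SIZES[-1])
--     return out
-- ===== SOURCE B (Python) =====
-- import bisect
--
-- BUCKET_SIZES = [32, 64, 96, 128, 160, 192, 256]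
--
-- def bucketize_lengths(lengths):
--     n = len(BUCKET_SIZES)
--     return [BUCKET_SIZES[i] if (i := bisect.bisect_left(BUCKET_SIZES, L)) < n else BUCKET_SIZES[-1]
--             for L in lengths]
-- ===== Notes on version B (the rewrite author's own statement) =====
-- stated objective: idiomatic
-- what changed: Replaces the inner first-fit linear scan with bisect.bisect_left binary search over the sorted bucket table, inside a list comprehension instead of an accumulator loop.
import Mathlib
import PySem

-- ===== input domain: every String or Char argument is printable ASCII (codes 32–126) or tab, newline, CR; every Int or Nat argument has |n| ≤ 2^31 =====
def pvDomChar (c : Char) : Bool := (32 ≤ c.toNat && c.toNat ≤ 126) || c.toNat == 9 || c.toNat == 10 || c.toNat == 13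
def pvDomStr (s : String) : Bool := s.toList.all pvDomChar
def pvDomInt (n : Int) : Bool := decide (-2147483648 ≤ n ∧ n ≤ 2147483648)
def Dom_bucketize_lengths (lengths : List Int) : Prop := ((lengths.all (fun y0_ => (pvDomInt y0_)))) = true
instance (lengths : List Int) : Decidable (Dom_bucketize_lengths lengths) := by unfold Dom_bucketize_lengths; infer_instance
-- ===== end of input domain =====

-- B replaces the inner first-fit linear scan with a bisect_left binary search over the sorted bucket table (idiomatic; same results).
-- ===== PORT A =====
def BUCKET_SIZES : List Int := [32, 64, 96, 128, 160, 192, 256]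

-- inner 'for s in BUCKET_SIZES: if L <= s: b = s; break' loop
def pvFirstFit (L : Int) : List Int → Option Int
  | [] => none
  | s :: rest => if L ≤ s then some s else pvFirstFit L rest

def bucketize_lengths (lengths : List Int) : List Int :=
  lengths.foldl (fun out L =>
    out ++ [match pvFirstFit L BUCKET_SIZES with
            | none => 256          -- BUCKET_SIZES[-1]; 'b or BUCKET_SIZES[-1]' with b = None
            | some v => if v = 0 then 256 else v]) []  -- Python truthiness of b

-- ===== PORT B =====
-- bisect.bisect_left(a, x) with lo = 0, hi = len(a)
def pvBisectLeft (a : List Int) (x : Int) (lo hi : Nat) : Nat :=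
  if _h : lo < hi then
    let mid := (lo + hi) / 2
    if a.getD mid 0 < x then pvBisectLeft a x (mid + 1) hi
    else pvBisectLeft a x lo mid
  else lo
termination_by hi - lo
decreasing_by all_goals omega

def bucketize_lengths_alt (lengths : List Int) : List Int :=
  lengths.map (fun L =>
    let i := pvBisectLeft BUCKET_SIZES L 0 BUCKET_SIZES.length
    if i < BUCKET_SIZES.length then BUCKET_SIZES.getD i 0 else BUCKET_SIZES.getLastD 0)

-- ===== PRECONDITION & SPEC =====
def Spec_bucketize_lengths (lengths : List Int) (out : List Int) : Prop := out = bucketize_lengths_alt lengths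
instance (lengths : List Int) (out : List Int) : Decidable (Spec_bucketize_lengths lengths out) := by unfold Spec_bucketize_lengths; infer_instance

-- ===== CLAIM (what is proved, stated in full; the proofs are below) =====
def Claim_equal_bucketize_lengths : Prop := ∀ (lengths : List Int), Dom_bucketize_lengths lengths → Spec_bucketize_lengths lengths (bucketize_lengths lengths)

-- ===== LEMMAS AND PROOFS =====

-- ===== VERDICT (by name: the statement is the Claim_ definition above) =====
-- one-step and base unfoldings of pvBisectLeft at the concrete calls reached on BUCKET_SIZES
theorem pvB_base (a : List Int) (x : Int) (lo : Nat) : pvBisectLeft a x lo lo = lo := by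
  rw [pvBisectLeft]; simp
theorem pvB07 (L : Int) : pvBisectLeft BUCKET_SIZES L 0 7 = if (128:Int) < L then pvBisectLeft BUCKET_SIZES L 4 7 else pvBisectLeft BUCKET_SIZES L 0 3 := by
  rw [pvBisectLeft]; norm_num [BUCKET_SIZES]
theorem pvB47 (L : Int) : pvBisectLeft BUCKET_SIZES L 4 7 = if (192:Int) < L then pvBisectLeft BUCKET_SIZES L 6 7 else pvBisectLeft BUCKET_SIZES L 4 5 := by
  rw [pvBisectLeft]; norm_num [BUCKET_SIZES]
theorem pvB03 (L : Int) : pvBisectLeft BUCKET_SIZES L 0 3 = if (64:Int) < L then pvBisectLeft BUCKET_SIZES L 2 3 else pvBisectLeft BUCKET_SIZES L 0 1 := by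
  rw [pvBisectLeft]; norm_num [BUCKET_SIZES]
theorem pvB67 (L : Int) : pvBisectLeft BUCKET_SIZES L 6 7 = if (256:Int) < L then 7 else 6 := by
  rw [pvBisectLeft]; norm_num [BUCKET_SIZES, pvB_base]
theorem pvB45 (L : Int) : pvBisectLeft BUCKET_SIZES L 4 5 = if (160:Int) < L then 5 else 4 := by
  rw [pvBisectLeft]; norm_num [BUCKET_SIZES, pvB_base]
theorem pvB23 (L : Int) : pvBisectLeft BUCKET_SIZES L 2 3 = if (96:Int) < L then 3 else 2 := by
  rw [pvBisectLeft]; norm_num [BUCKET_SIZES, pvB_base]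
theorem pvB01 (L : Int) : pvBisectLeft BUCKET_SIZES L 0 1 = if (32:Int) < L then 1 else 0 := by
  rw [pvBisectLeft]; norm_num [BUCKET_SIZES, pvB_base]

-- closed form of the binary search on the concrete bucket table
theorem bisect_closed (L : Int) : pvBisectLeft BUCKET_SIZES L 0 7 =
    if L ≤ 32 then 0 else if L ≤ 64 then 1 else if L ≤ 96 then 2 else if L ≤ 128 then 3
    else if L ≤ 160 then 4 else if L ≤ 192 then 5 else if L ≤ 256 then 6 else 7 := by
  simp only [pvB07, pvB47, pvB03, pvB67, pvB45, pvB23, pvB01]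
  split_ifs <;> omega

-- per-element agreement: both pick the smallest bucket ≥ L (256 when L > 256)
theorem pv_elem_eq (L : Int) :
    (match pvFirstFit L BUCKET_SIZES with
     | none => (256 : Int)
     | some v => if v = 0 then 256 else v) =
    (let i := pvBisectLeft BUCKET_SIZES L 0 BUCKET_SIZES.length
     if i < BUCKET_SIZES.length then BUCKET_SIZES.getD i 0 else BUCKET_SIZES.getLastD 0) := by
  show _ = (if pvBisectLeft BUCKET_SIZES L 0 BUCKET_SIZES.length < BUCKET_SIZES.length then BUCKET_SIZES.getD (pvBisectLeft BUCKET_SIZES L 0 BUCKET_SIZES.length) 0 else BUCKET_SIZES.getLastD 0)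
  have hlen : BUCKET_SIZES.length = 7 := by norm_num [BUCKET_SIZES]
  rw [hlen, bisect_closed]
  simp only [pvFirstFit, BUCKET_SIZES]
  split_ifs <;> first | rfl | omega

theorem pv_foldl_append {f : Int → Int} (xs : List Int) (acc : List Int) :
    xs.foldl (fun out L => out ++ [f L]) acc = acc ++ xs.map f := by
  induction xs generalizing acc with
  | nil => simp
  | cons x xs ih => simp [List.foldl, ih, List.append_assoc]

theorem bucketize_lengths_spec : Claim_equal_bucketize_lengths := by
  intro lengths _
  unfold Spec_bucketize_lengths bucketize_lengths bucketize_lengths_alt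
  rw [pv_foldl_append]
  simp only [List.nil_append]
  exact List.map_congr_left (fun L _ => pv_elem_eq L)
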